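-- pv_equiv track=rewrite | github.com/kujaku11/mt_metadata | mt_metadata/utils/units.py | find_separator
-- ===== SOURCE A (Python) =====
-- from collections import OrderedDict
--
-- def find_separator(unit_string: str) -> str:
--     """
--     Find the first separator in a unit string.
--
--     Parameters
--     ----------
--     unit_string : str
--         The unit string to search for separators.
--
--     Returns
--     -------
--     str
--         The first separator found in the unit string.
--     """
--
--     find_dict = {}
--     for sep in ["/", " per ", " "]:
--         find_dict[sep] = unit_string.find(sep)
--     # Sort the dictionary by the index of the separator in the unit string
--     # and return the first separator found
--     find_dict = OrderedDict(sorted(find_dict.items(), key=lambda item: item[1]))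
--     for sep in find_dict.keys():
--         if find_dict[sep] > -1:
--             return sep
--     return
-- ===== SOURCE B (Python) =====
-- def find_separator(unit_string: str) -> str:
--     """Single pass over the ordered separators, tracking the best (separator, index)."""
--     best = None
--     for sep in ["/", " per ", " "]:
--         idx = unit_string.find(sep)
--         if idx >= 0 and (best is None or idx < best[1]):
--             best = (sep, idx)
--     if best is None:
--         return
--     return best[0]
-- ===== Notes on version B (the rewrite author's own statement) =====
-- stated objective: simpler
-- what changed: Replaces the dict build + stable sort of (separator, index) pairs + second scan with one pass over the ordered separator list that keeps a running (separator, index) minimum under strict less-than, so the first-listed separator wins ties exactly as the stable sort does.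
import Mathlib
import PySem

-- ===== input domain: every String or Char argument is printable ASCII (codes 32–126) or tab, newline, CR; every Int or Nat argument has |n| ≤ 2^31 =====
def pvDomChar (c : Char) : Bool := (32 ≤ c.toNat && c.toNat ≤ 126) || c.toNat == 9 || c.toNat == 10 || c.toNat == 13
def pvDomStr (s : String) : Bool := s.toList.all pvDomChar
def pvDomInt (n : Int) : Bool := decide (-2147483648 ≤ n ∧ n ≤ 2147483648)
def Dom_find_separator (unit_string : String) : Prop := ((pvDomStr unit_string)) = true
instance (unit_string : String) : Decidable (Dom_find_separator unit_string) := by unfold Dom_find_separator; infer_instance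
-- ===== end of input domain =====

-- B replaces A's dict build + stable sort of (separator, index) pairs + second scan by a single
-- pass over the ordered separator list keeping a running minimum (objective: simpler).

-- ===== PORT A =====
-- for sep in find_dict.keys(): if find_dict[sep] > -1: return sep
-- (every key scanned is present in the dict, so getD's default -1 is never read)
def findLoopA (d : PySem.Dict String Int) : List String → Option String
  | [] => none
  | k :: ks => if PySem.Dict.getD d k (-1) > -1 then some k else findLoopA d ks

def find_separator (unit_string : String) : Option String :=
  let find_dict : PySem.Dict String Int :=
    (["/", " per ", " "]).foldl (fun d sep => d.insert sep (PySem.Str.find unit_string sep)) PySem.Dict.empty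
  let find_dict := PySem.Dict.ofList (PySem.List.sorted find_dict.items (fun it => it.2) false)
  findLoopA find_dict find_dict.keys

-- ===== PORT B =====
def find_separator_alt (unit_string : String) : Option String :=
  let best := (["/", " per ", " "]).foldl (fun best sep =>
      let idx := PySem.Str.find unit_string sep
      match best with
      | none => if idx ≥ 0 then some (sep, idx) else none
      | some p => if idx ≥ 0 ∧ idx < p.2 then some (sep, idx) else some p)
    (none : Option (String × Int))
  best.map Prod.fst

-- ===== PRECONDITION & SPEC =====
def Spec_find_separator (unit_string : String) (out : Option String) : Prop := out = find_separator_alt unit_string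
instance (unit_string : String) (out : Option String) : Decidable (Spec_find_separator unit_string out) := by unfold Spec_find_separator; infer_instance

-- ===== CLAIM (what is proved, stated in full; the proofs are below) =====
def Claim_equal_find_separator : Prop := ∀ (unit_string : String), Dom_find_separator unit_string → Spec_find_separator unit_string (find_separator unit_string)

-- ===== LEMMAS AND PROOFS =====

-- The whole equivalence, abstracted over the three find() results f "/" , f " per ", f " ".
set_option maxHeartbeats 2000000 in
lemma find_separator_core (f : String → Int) :
    findLoopA (PySem.Dict.ofList (PySem.List.sorted [("/", f "/"), (" per ", f " per "), (" ", f " ")] (fun it => it.2) false))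
      (PySem.Dict.ofList (PySem.List.sorted [("/", f "/"), (" per ", f " per "), (" ", f " ")] (fun it => it.2) false)).keys
    = ((["/", " per ", " "] : List String).foldl (fun best sep =>
        let idx := f sep
        match best with
        | none => if idx ≥ 0 then some (sep, idx) else none
        | some p => if idx ≥ 0 ∧ idx < p.2 then some (sep, idx) else some p)
      (none : Option (String × Int))).map Prod.fst := by
  rw [PySem.List.sorted_eq_foldl_insertBy]
  simp only [List.foldl, PySem.List.insertBy]
  generalize f "/" = a
  generalize f " per " = b
  generalize f " " = c
  split_ifs <;>
    simp_all [findLoopA, PySem.Dict.ofList, PySem.Dict.update, PySem.Dict.insert,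
      PySem.Dict.contains, PySem.Dict.empty, PySem.Dict.keys, PySem.Dict.getD,
      PySem.Dict.get?, PySem.List.insertBy] <;>
  split_ifs <;>
    simp_all [findLoopA, PySem.Dict.ofList, PySem.Dict.update, PySem.Dict.insert,
      PySem.Dict.contains, PySem.Dict.empty, PySem.Dict.keys, PySem.Dict.getD,
      PySem.Dict.get?, PySem.List.insertBy] <;>
  (try omega) <;> split_ifs <;> (first | rfl | omega | simp_all <;> omega)

lemma find_separator_items (s : String) :
    ((["/", " per ", " "] : List String).foldl
        (fun d sep => d.insert sep (PySem.Str.find s sep)) PySem.Dict.empty).items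
    = [("/", PySem.Str.find s "/"), (" per ", PySem.Str.find s " per "), (" ", PySem.Str.find s " ")] := by
  simp [List.foldl, PySem.Dict.insert, PySem.Dict.contains, PySem.Dict.empty]

-- ===== VERDICT (by name: the statement is the Claim_ definition above) =====
theorem find_separator_spec : Claim_equal_find_separator := by
  intro s _
  unfold Spec_find_separator find_separator find_separator_alt
  simp only [find_separator_items s]
  exact find_separator_core (fun sep => PySem.Str.find s sep)
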